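-- pv_equiv track=rewrite | github.com/usc-isi-bass/math_to_symbexpr_map_generation | backward_slice/backward_slice_extraction.py | parse_reg_offset
-- ===== SOURCE A (Python) =====
-- def parse_reg_offset(location):
--     if location.startswith("Add64") or location.startswith("Sub64"):
--         op, rest = location[:-1].split("(", 1)
--         lhs, rhs = rest.rsplit(",", 1)
--         # Specially handle FS register
--         if rhs == "i_fs":
--             base = "fs"
--             offset = int(lhs)
--             return base, offset
--         base, offset = parse_reg_offset(lhs)
--         if op == "Add64":
--             offset += int(rhs)
--         else:
--             offset -= int(rhs)
--         return base, offset
--     else: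
--         if location.startswith("i_"):
--             return location.replace("i_", ""), 0
--         else:
--             return None, int(location)
-- ===== SOURCE B (Python) =====
-- def parse_reg_offset(location):
--     offset = 0
--     while location[:6] in ("Add64(", "Sub64("):
--         sign = 1 if location[0] == 'A' else -1
--         body = location[6:-1]
--         lhs, _, rhs = body.rpartition(",")
--         if rhs == "i_fs":
--             return "fs", offset + int(lhs)
--         offset += sign * int(rhs)
--         location = lhs
--     if location[:2] == "i_":
--         return location.replace("i_", ""), offset
--     return None, offset + int(location)
-- ===== Notes on version B (the rewrite author's own statement) =====
-- stated objective: alternative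
-- what changed: Replaces A's unwinding recursion with a single iterative loop that keeps a running signed offset accumulator and peels one Add64/Sub64 layer per step via fixed slicing (location[6:-1]) and rpartition, instead of recursing on the lhs and folding offsets on the way back out.
-- outside the precondition, e.g. on parse_reg_offset('Add64x(1,2)'): A returns (None, -1), B raises ValueError; on parse_reg_offset('Add64(1,i_fsx'): A returns ('fs', 1), B returns ('fs', 1); on parse_reg_offset('('): A raises ValueError, B raises ValueError
import Mathlib
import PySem

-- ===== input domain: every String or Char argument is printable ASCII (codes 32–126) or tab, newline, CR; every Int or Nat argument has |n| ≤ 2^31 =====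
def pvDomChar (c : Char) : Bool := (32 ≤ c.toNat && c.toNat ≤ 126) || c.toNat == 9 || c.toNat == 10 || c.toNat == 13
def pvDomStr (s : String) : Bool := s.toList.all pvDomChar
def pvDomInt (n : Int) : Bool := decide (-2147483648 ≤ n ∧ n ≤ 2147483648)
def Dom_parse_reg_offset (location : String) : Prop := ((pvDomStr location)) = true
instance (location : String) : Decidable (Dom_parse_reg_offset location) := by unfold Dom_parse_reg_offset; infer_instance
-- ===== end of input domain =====

-- B re-implements A's unwinding recursion as a single loop with a running signed offset
-- accumulator (alternative decomposition, same cost); equivalence is proved on well-formed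
-- Add64/Sub64 offset expressions (Pre_ below).

-- Termination helper for the ports (cited by their decreasing_by): every piece returned by
-- str.split(sep, maxsplit) is at most as long as the string that was split.
theorem pvGoLenLe (sep : List Char) (N : Nat) :
    ∀ (fuel m : Nat) (l cur : List Char) (acc : List (List Char)),
      (∀ q ∈ acc, q.length ≤ N) → cur.length + l.length ≤ N →
      ∀ p ∈ PySem.Chars.splitOnMax.go sep fuel m l cur acc, p.length ≤ N := by
  intro fuel
  induction fuel with
  | zero =>
    intro m l cur acc hacc hlen p hp
    simp [PySem.Chars.splitOnMax.go] at hp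
    rcases hp with h | h
    · exact hacc _ h
    · subst h; simp; omega
  | succ f ih =>
    intro m l cur acc hacc hlen p hp
    cases l with
    | nil =>
      simp [PySem.Chars.splitOnMax.go] at hp
      rcases hp with h | h
      · exact hacc _ h
      · subst h; simp; omega
    | cons c rest =>
      simp only [PySem.Chars.splitOnMax.go] at hp
      split at hp
      · simp at hp
        rcases hp with h | h
        · exact hacc _ h
        · subst h; simp at hlen ⊢; omega
      · split at hp
        · refine ih _ _ _ _ ?_ ?_ p hp
          · intro q hq
            simp at hq
            rcases hq with h | h
            · subst h; simp; omega
            · exact hacc _ h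
          · simp at hlen ⊢
            have := List.length_drop (l := c :: rest) (i := sep.length)
            omega
        · refine ih _ _ _ _ hacc ?_ p hp
          simp at hlen ⊢
          omega

theorem pvSplitPieceLen (t sep : String) (m : Int) (hm : 0 ≤ m) (pieces : List String)
    (h : PySem.Str.splitMax? t sep m = some pieces) :
    ∀ p ∈ pieces, p.toList.length ≤ t.toList.length := by
  intro p hp
  simp [PySem.Str.splitMax?, PySem.Chars.splitMax?] at h
  obtain ⟨hsep, hpieces⟩ := h
  subst hpieces
  simp at hp
  obtain ⟨q, hq, rfl⟩ := hp
  simp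
  unfold PySem.Chars.splitOnMax at hq
  split at hq
  · omega
  · exact pvGoLenLe sep.toList t.toList.length _ _ _ _ _ (by simp) (by simp) q hq

-- Slice-length facts cited by the ports' decreasing_by.
theorem pvSliceToLen (x : String) (j : Int) (hj : 0 ≤ j) :
    (PySem.Str.slice x none (some j)).toList.length ≤ x.toList.length := by
  rw [PySem.Str.toList_slice, PySem.Chars.slice_eq_listSlice, PySem.List.slice_to _ hj]
  simp only [List.length_take]
  omega

theorem pvSliceBodyLen (x : String) (hx : 1 ≤ x.toList.length) :
    (PySem.Str.slice x (some 6) (some (-1))).toList.length < x.toList.length := by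
  rw [PySem.Str.toList_slice, PySem.Chars.slice_eq_listSlice, PySem.List.length_slice,
      PySem.List.clampIdx_neg_one]
  omega

theorem pvSliceSixLen (x : String) (op : String) (h : PySem.Str.slice x none (some 6) = op)
    (hop : op.toList.length = 6) : 6 ≤ x.toList.length := by
  have h' := congrArg String.toList h
  rw [PySem.Str.toList_slice, PySem.Chars.slice_eq_listSlice,
      PySem.List.slice_to _ (by omega : (0:Int) ≤ 6)] at h'
  have := congrArg List.length h'
  simp only [List.length_take] at this
  rw [hop] at this
  have h62 : ((6:Int)).toNat = 6 := rfl
  omega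

-- ===== PORT A =====
def parse_reg_offset (location : String) : Option String × Int :=
  if h0 : (PySem.Str.startswith location "Add64" || PySem.Str.startswith location "Sub64") = true then
    -- op, rest = location[:-1].split("(", 1)  — Python raises ValueError when there is no "(" (outside Pre_)
    match hp : PySem.Str.splitMax? (PySem.Str.slice location none (some (-1))) "(" 1 with
    | some [op, rest] =>
      -- lhs, rhs = rest.rsplit(",", 1) — ported by hand via rfind (PySem has no rsplit); exact for maxsplit=1
      let j := PySem.Str.rfind rest ","
      if hj : 0 ≤ j then
        let lhs := PySem.Str.slice rest none (some j)
        let rhs := PySem.Str.slice rest (some (j + 1)) none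
        if rhs = "i_fs" then
          (some "fs", (PySem.Int.ofStr? lhs).getD 0)   -- int(lhs) raises when lhs is no int literal (outside Pre_)
        else
          let p := parse_reg_offset lhs
          if op = "Add64" then (p.1, p.2 + (PySem.Int.ofStr? rhs).getD 0)
          else (p.1, p.2 - (PySem.Int.ofStr? rhs).getD 0)
      else (none, 0)  -- Python: rsplit yields one piece and the unpacking raises ValueError (outside Pre_)
    | _ => (none, 0)  -- Python: split yields one piece and the unpacking raises ValueError (outside Pre_)
  else
    if PySem.Str.startswith location "i_" then (some (PySem.Str.replace location "i_" ""), 0)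
    else (none, (PySem.Int.ofStr? location).getD 0)   -- int(location) raises when no int literal (outside Pre_)
termination_by location.toList.length
decreasing_by
  have h1 : rest.toList.length ≤ (PySem.Str.slice location none (some (-1))).toList.length :=
    pvSplitPieceLen _ _ _ (by omega) _ hp rest (by simp)
  have h2 : (PySem.Str.slice location none (some (-1))).toList = location.toList.dropLast :=
    PySem.Str.slice_to_neg_one location
  have h3 : (PySem.Str.slice rest none (some (PySem.Str.rfind rest ","))).toList.length ≤ rest.toList.length :=
    pvSliceToLen rest _ hj
  have h4 : location.toList ≠ [] := by
    rcases Bool.or_eq_true_iff.mp h0 with h | h <;>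
    · have := (PySem.Chars.startswith_iff _ _).mp h
      intro hnil
      simp [hnil] at this
  have h5 : (PySem.Str.slice location none (some (-1))).toList.length = location.toList.length - 1 := by
    rw [h2]; exact List.length_dropLast
  have h6 : 0 < location.toList.length := List.length_pos_iff.mpr h4
  omega

-- ===== PORT B =====
def pvParseLoop (location : String) (offset : Int) : Option String × Int :=
  if h0 : PySem.Str.slice location none (some 6) = "Add64(" ∨ PySem.Str.slice location none (some 6) = "Sub64(" then
    -- location[0] == 'A' (location is nonempty here); the 1-char string compare is a Char compare
    let sign : Int := if PySem.Str.pyGet? location 0 = some 'A' then 1 else -1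
    let body := PySem.Str.slice location (some 6) (some (-1))
    -- lhs, _, rhs = body.rpartition(",") — ported by hand via rfind (PySem has no rpartition)
    let j := PySem.Str.rfind body ","
    let lhs := if 0 ≤ j then PySem.Str.slice body none (some j) else ""
    let rhs := if 0 ≤ j then PySem.Str.slice body (some (j + 1)) none else body
    if rhs = "i_fs" then (some "fs", offset + (PySem.Int.ofStr? lhs).getD 0)
    else pvParseLoop lhs (offset + sign * (PySem.Int.ofStr? rhs).getD 0)
  else if PySem.Str.slice location none (some 2) = "i_" then
    (some (PySem.Str.replace location "i_" ""), offset)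
  else (none, offset + (PySem.Int.ofStr? location).getD 0)
termination_by location.toList.length
decreasing_by
  have h6 : 6 ≤ location.toList.length := by
    rcases h0 with h | h
    · exact pvSliceSixLen location "Add64(" h rfl
    · exact pvSliceSixLen location "Sub64(" h rfl
  have hb : (PySem.Str.slice location (some 6) (some (-1))).toList.length < location.toList.length :=
    pvSliceBodyLen location (by omega)
  split
  · have := pvSliceToLen (PySem.Str.slice location (some 6) (some (-1)))
      (PySem.Str.rfind (PySem.Str.slice location (some 6) (some (-1))) ",") (by assumption)
    omega
  · have : ("" : String).toList.length = 0 := rfl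
    omega

def parse_reg_offset_alt (location : String) : Option String × Int :=
  pvParseLoop location 0

-- ===== PRECONDITION & SPEC =====
def pvIsInt (cs : List Char) : Bool := (PySem.Int.ofChars? cs).isSome

-- A plain token of the grammar: a register name ("i_…") or a Python int literal; such a token
-- never starts with an operator name.
def pvTok (cs : List Char) : Bool :=
  (¬ "Add64".toList.isPrefixOf cs ∧ ¬ "Sub64".toList.isPrefixOf cs)
    ∧ ("i_".toList.isPrefixOf cs ∨ pvIsInt cs = true)

-- One grammar node, nesting depth bounded by the first argument (depth ≤ length of the string,
-- so Pre_ below instantiates the bound with the string length):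
--   E ::= "Add64(" E "," INT ")" | "Sub64(" E "," INT ")"
--       | "Add64(" INT ",i_fs)"  | "Sub64(" INT ",i_fs)"  | REG | INT
-- where INT is a Python int literal, REG starts with "i_", and the "," separating a node's two
-- children is the LAST comma of its body (matching how both programs cut the string).
def pvWfDepth : Nat → List Char → Bool
  | 0, cs => pvTok cs
  | d + 1, cs =>
    if ("Add64(".toList.isPrefixOf cs || "Sub64(".toList.isPrefixOf cs) = true
        ∧ cs.getLast? = some ')' then
      let mid := (cs.drop 6).dropLast
      let j := PySem.Chars.rfind mid [',']
      if 0 ≤ j then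
        let lhs := mid.take j.toNat
        let rhs := mid.drop (j.toNat + 1)
        (rhs = "i_fs".toList ∧ pvIsInt lhs = true) ∨ (pvIsInt rhs = true ∧ pvWfDepth d lhs = true)
      else False
    else pvTok cs

-- Pre_: `location` is a well-formed register/offset expression of the grammar above.  Pre_
-- excludes every input on which A raises (ValueError from unpacking or int()), and also
-- malformed strings (a bad operator token or a missing final close paren) on which A still
-- returns a value while B's stricter loop raises or differs; see the claim file for examples.
def Pre_parse_reg_offset (location : String) : Prop := pvWfDepth location.toList.length location.toList = true
instance (location : String) : Decidable (Pre_parse_reg_offset location) := by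
  unfold Pre_parse_reg_offset; infer_instance

def pvWitness_parse_reg_offset : String := "Add64(Sub64(i_rbp,8),16)"

def Spec_parse_reg_offset (location : String) (out : Option String × Int) : Prop := out = parse_reg_offset_alt location
instance (location : String) (out : Option String × Int) : Decidable (Spec_parse_reg_offset location out) := by unfold Spec_parse_reg_offset; infer_instance

-- ===== CLAIM (what is proved, stated in full; the proofs are below) =====
def Claim_equal_parse_reg_offset : Prop := ∀ (location : String), Dom_parse_reg_offset location → Pre_parse_reg_offset location → Spec_parse_reg_offset location (parse_reg_offset location)

-- ===== LEMMAS AND PROOFS =====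

theorem pvGoMzero (sep : List Char) (fuel : Nat) (l : List Char) (acc : List (List Char)) :
    PySem.Chars.splitOnMax.go sep fuel 0 l [] acc = (l :: acc).reverse := by
  cases fuel <;> cases l <;> simp [PySem.Chars.splitOnMax.go]

theorem pvGoParen (b : List Char) :
    ∀ (a : List Char) (fuel : Nat) (cur : List Char) (acc : List (List Char)),
      a.length < fuel → '(' ∉ a →
      PySem.Chars.splitOnMax.go ['('] fuel 1 (a ++ '(' :: b) cur acc =
        acc.reverse ++ [cur.reverse ++ a, b] := by
  intro a
  induction a with
  | nil =>
    intro fuel cur acc hf ha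
    cases fuel with
    | zero => omega
    | succ f =>
      simp [PySem.Chars.splitOnMax.go, List.isPrefixOf]
      rw [pvGoMzero]
      simp
  | cons c a ih =>
    intro fuel cur acc hf ha
    cases fuel with
    | zero => simp at hf
    | succ f =>
      have hc : c ≠ '(' := by simp at ha; tauto
      have hpre : (['('] : List Char).isPrefixOf (c :: (a ++ '(' :: b)) = false := by
        simp [List.isPrefixOf]
        exact fun h => hc h.symm
      simp only [List.cons_append, PySem.Chars.splitOnMax.go, hpre]
      simp only [if_neg (by omega : ¬ (1 = 0)), Bool.false_eq_true, if_false]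
      rw [ih f (c :: cur) acc (by simp at hf ⊢; omega) (by simp at ha; tauto)]
      simp

theorem pvSplitParen (a b : List Char) (ha : '(' ∉ a) :
    PySem.Chars.splitMax? (a ++ '(' :: b) ['('] 1 = some [a, b] := by
  simp [PySem.Chars.splitMax?, PySem.Chars.splitOnMax]
  rw [pvGoParen b a _ [] [] (by simp) ha]
  simp

theorem pvOfStrOfList (l : List Char) : PySem.Int.ofStr? (String.ofList l) = PySem.Int.ofChars? l := by
  show PySem.Int.ofChars? (String.ofList l).toList = _
  simp

theorem pvSlice6Neg1 (cs : List Char) (h : 7 ≤ cs.length) :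
    PySem.List.slice cs (some 6) (some (-1)) = (cs.drop 6).dropLast := by
  have hne : cs ≠ [] := by intro h0; simp [h0] at h
  simp [PySem.List.slice, PySem.List.clampIdx, hne, List.dropLast_eq_take,
    show min 6 cs.length = 6 from by omega]
  omega

-- One unfolding step of port A on a syntactically well-shaped Add64 node.
theorem pvPortAStepAdd (s : String) (mid : List Char)
    (h : s.toList = "Add64(".toList ++ mid ++ [')']) :
    parse_reg_offset s =
      if 0 ≤ PySem.Chars.rfind mid [','] then
        (if mid.drop ((PySem.Chars.rfind mid [',']).toNat + 1) = "i_fs".toList then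
          (some "fs", (PySem.Int.ofChars? (mid.take (PySem.Chars.rfind mid [',']).toNat)).getD 0)
        else
          ((parse_reg_offset (String.ofList (mid.take (PySem.Chars.rfind mid [',']).toNat))).1,
           (parse_reg_offset (String.ofList (mid.take (PySem.Chars.rfind mid [',']).toNat))).2
             + (PySem.Int.ofChars? (mid.drop ((PySem.Chars.rfind mid [',']).toNat + 1))).getD 0))
      else (none, 0) := by
  have hguard : (PySem.Str.startswith s "Add64" || PySem.Str.startswith s "Sub64") = true := by
    have : PySem.Str.startswith s "Add64" = true := by
      rw [PySem.Str.startswith_eq, PySem.Chars.startswith_iff, h]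
      exact ⟨'(' :: mid ++ [')'], by simp⟩
    exact Bool.or_eq_true_iff.mpr (Or.inl this)
  have hdl : (PySem.Str.slice s none (some (-1))).toList = "Add64".toList ++ '(' :: mid := by
    rw [PySem.Str.slice_to_neg_one, h]
    rw [show ("Add64(".toList ++ mid ++ [')'] : List Char) = ("Add64(".toList ++ mid) ++ [')'] by simp]
    rw [List.dropLast_concat]
    rfl
  have hsp : PySem.Str.splitMax? (PySem.Str.slice s none (some (-1))) "(" 1
      = some ["Add64", String.ofList mid] := by
    have hc : PySem.Chars.splitMax? ("Add64".toList ++ '(' :: mid) ['('] 1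
        = some ["Add64".toList, mid] := pvSplitParen _ _ (by decide)
    rw [PySem.Str.splitMax?]
    rw [show ("(" : String).toList = ['('] from rfl, hdl, hc]
    rfl
  rw [parse_reg_offset, dif_pos hguard]
  split
  case _ op rest heq =>
    rw [hsp] at heq
    obtain ⟨hop, hrest⟩ : op = "Add64" ∧ rest = String.ofList mid := by
      injection heq with h1
      injection h1 with h2 h3
      injection h3 with h4
      exact ⟨h2.symm, h4.symm⟩
    subst hop hrest
    have hto : (String.ofList mid).toList = mid := by simp
    have hrf : PySem.Str.rfind (String.ofList mid) "," = PySem.Chars.rfind mid [','] := by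
      rw [PySem.Str.rfind_eq, hto]; rfl
    rw [hrf]
    by_cases hj : (0:Int) ≤ PySem.Chars.rfind mid [',']
    · rw [dif_pos hj, if_pos hj]
      have hlhs : PySem.Str.slice (String.ofList mid) none (some (PySem.Chars.rfind mid [','])) =
          String.ofList (mid.take (PySem.Chars.rfind mid [',']).toNat) := by
        rw [← String.toList_inj, PySem.Str.toList_slice, hto, PySem.Chars.slice_eq_listSlice,
            PySem.List.slice_to _ hj]
        simp
      have hrhs : PySem.Str.slice (String.ofList mid) (some (PySem.Chars.rfind mid [','] + 1)) none =
          String.ofList (mid.drop ((PySem.Chars.rfind mid [',']).toNat + 1)) := by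
        rw [← String.toList_inj, PySem.Str.toList_slice, hto, PySem.Chars.slice_eq_listSlice,
            PySem.List.slice_from _ (by omega), show (PySem.Chars.rfind mid [','] + 1).toNat
              = (PySem.Chars.rfind mid [',']).toNat + 1 from by omega]
        simp
      rw [hlhs, hrhs]
      have hcond : (String.ofList (mid.drop ((PySem.Chars.rfind mid [',']).toNat + 1)) = "i_fs") ↔
          (mid.drop ((PySem.Chars.rfind mid [',']).toNat + 1) = "i_fs".toList) := by
        rw [← String.toList_inj]
        simp
      by_cases hfs : mid.drop ((PySem.Chars.rfind mid [',']).toNat + 1) = "i_fs".toList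
      · rw [if_pos (hcond.mpr hfs), if_pos hfs, pvOfStrOfList]
      · rw [if_neg (fun hx => hfs (hcond.mp hx)), if_neg hfs, if_pos rfl, pvOfStrOfList]
    · rw [dif_neg hj, if_neg hj]
  case _ hne =>
    exact absurd hsp (by intro hc; exact hne "Add64" (String.ofList mid) hc)

-- One unfolding step of port A on a syntactically well-shaped Sub64 node.
theorem pvPortAStepSub (s : String) (mid : List Char)
    (h : s.toList = "Sub64(".toList ++ mid ++ [')']) :
    parse_reg_offset s =
      if 0 ≤ PySem.Chars.rfind mid [','] then
        (if mid.drop ((PySem.Chars.rfind mid [',']).toNat + 1) = "i_fs".toList then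
          (some "fs", (PySem.Int.ofChars? (mid.take (PySem.Chars.rfind mid [',']).toNat)).getD 0)
        else
          ((parse_reg_offset (String.ofList (mid.take (PySem.Chars.rfind mid [',']).toNat))).1,
           (parse_reg_offset (String.ofList (mid.take (PySem.Chars.rfind mid [',']).toNat))).2
             - (PySem.Int.ofChars? (mid.drop ((PySem.Chars.rfind mid [',']).toNat + 1))).getD 0))
      else (none, 0) := by
  have hguard : (PySem.Str.startswith s "Add64" || PySem.Str.startswith s "Sub64") = true := by
    have : PySem.Str.startswith s "Sub64" = true := by
      rw [PySem.Str.startswith_eq, PySem.Chars.startswith_iff, h]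
      exact ⟨'(' :: mid ++ [')'], by simp⟩
    exact Bool.or_eq_true_iff.mpr (Or.inr this)
  have hdl : (PySem.Str.slice s none (some (-1))).toList = "Sub64".toList ++ '(' :: mid := by
    rw [PySem.Str.slice_to_neg_one, h]
    rw [show ("Sub64(".toList ++ mid ++ [')'] : List Char) = ("Sub64(".toList ++ mid) ++ [')'] by simp]
    rw [List.dropLast_concat]
    rfl
  have hsp : PySem.Str.splitMax? (PySem.Str.slice s none (some (-1))) "(" 1
      = some ["Sub64", String.ofList mid] := by
    have hc : PySem.Chars.splitMax? ("Sub64".toList ++ '(' :: mid) ['('] 1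
        = some ["Sub64".toList, mid] := pvSplitParen _ _ (by decide)
    rw [PySem.Str.splitMax?]
    rw [show ("(" : String).toList = ['('] from rfl, hdl, hc]
    rfl
  rw [parse_reg_offset, dif_pos hguard]
  split
  case _ op rest heq =>
    rw [hsp] at heq
    obtain ⟨hop, hrest⟩ : op = "Sub64" ∧ rest = String.ofList mid := by
      injection heq with h1
      injection h1 with h2 h3
      injection h3 with h4
      exact ⟨h2.symm, h4.symm⟩
    subst hop hrest
    have hto : (String.ofList mid).toList = mid := by simp
    have hrf : PySem.Str.rfind (String.ofList mid) "," = PySem.Chars.rfind mid [','] := by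
      rw [PySem.Str.rfind_eq, hto]; rfl
    rw [hrf]
    by_cases hj : (0:Int) ≤ PySem.Chars.rfind mid [',']
    · rw [dif_pos hj, if_pos hj]
      have hlhs : PySem.Str.slice (String.ofList mid) none (some (PySem.Chars.rfind mid [','])) =
          String.ofList (mid.take (PySem.Chars.rfind mid [',']).toNat) := by
        rw [← String.toList_inj, PySem.Str.toList_slice, hto, PySem.Chars.slice_eq_listSlice,
            PySem.List.slice_to _ hj]
        simp
      have hrhs : PySem.Str.slice (String.ofList mid) (some (PySem.Chars.rfind mid [','] + 1)) none =
          String.ofList (mid.drop ((PySem.Chars.rfind mid [',']).toNat + 1)) := by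
        rw [← String.toList_inj, PySem.Str.toList_slice, hto, PySem.Chars.slice_eq_listSlice,
            PySem.List.slice_from _ (by omega), show (PySem.Chars.rfind mid [','] + 1).toNat
              = (PySem.Chars.rfind mid [',']).toNat + 1 from by omega]
        simp
      rw [hlhs, hrhs]
      have hcond : (String.ofList (mid.drop ((PySem.Chars.rfind mid [',']).toNat + 1)) = "i_fs") ↔
          (mid.drop ((PySem.Chars.rfind mid [',']).toNat + 1) = "i_fs".toList) := by
        rw [← String.toList_inj]
        simp
      by_cases hfs : mid.drop ((PySem.Chars.rfind mid [',']).toNat + 1) = "i_fs".toList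
      · rw [if_pos (hcond.mpr hfs), if_pos hfs, pvOfStrOfList]
      · rw [if_neg (fun hx => hfs (hcond.mp hx)), if_neg hfs,
            if_neg (by decide : ¬ (("Sub64" : String) = "Add64")), pvOfStrOfList]
    · rw [dif_neg hj, if_neg hj]
  case _ hne =>
    exact absurd hsp (by intro hc; exact hne "Sub64" (String.ofList mid) hc)

-- One iteration of port B's loop on a well-shaped node (op = "Add64(" or "Sub64(").
theorem pvPortBStep (s : String) (op6 : List Char) (sign : Int) (mid : List Char)
    (hop : (op6 = "Add64(".toList ∧ sign = 1) ∨ (op6 = "Sub64(".toList ∧ sign = -1))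
    (h : s.toList = op6 ++ mid ++ [')']) (acc : Int) :
    pvParseLoop s acc =
      (if (if 0 ≤ PySem.Chars.rfind mid [','] then mid.drop ((PySem.Chars.rfind mid [',']).toNat + 1) else mid) = "i_fs".toList then
        (some "fs", acc + (PySem.Int.ofChars? (if 0 ≤ PySem.Chars.rfind mid [','] then mid.take (PySem.Chars.rfind mid [',']).toNat else [])).getD 0)
      else
        pvParseLoop (String.ofList (if 0 ≤ PySem.Chars.rfind mid [','] then mid.take (PySem.Chars.rfind mid [',']).toNat else []))
          (acc + sign * (PySem.Int.ofChars? (if 0 ≤ PySem.Chars.rfind mid [','] then mid.drop ((PySem.Chars.rfind mid [',']).toNat + 1) else mid)).getD 0)) := by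
  have hlen6 : op6.length = 6 := by rcases hop with ⟨h1, _⟩ | ⟨h1, _⟩ <;> subst h1 <;> rfl
  have hlen : s.toList.length = mid.length + 7 := by rw [h]; simp [hlen6]; omega
  have htake6 : s.toList.take 6 = op6 := by
    rw [h, show (op6 ++ mid ++ [')'] : List Char) = op6 ++ (mid ++ [')']) by simp, ← hlen6]
    exact List.take_left
  have hsl6 : PySem.Str.slice s none (some 6) = String.ofList op6 := by
    rw [← String.toList_inj, PySem.Str.toList_slice, PySem.Chars.slice_eq_listSlice,
        PySem.List.slice_to _ (by omega : (0:Int) ≤ 6)]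
    simpa using htake6
  have hguard : PySem.Str.slice s none (some 6) = "Add64(" ∨ PySem.Str.slice s none (some 6) = "Sub64(" := by
    rcases hop with ⟨h1, _⟩ | ⟨h1, _⟩
    · exact Or.inl (by rw [hsl6, h1]; rfl)
    · exact Or.inr (by rw [hsl6, h1]; rfl)
  have hbody : PySem.Str.slice s (some 6) (some (-1)) = String.ofList mid := by
    rw [← String.toList_inj, PySem.Str.toList_slice, PySem.Chars.slice_eq_listSlice,
        pvSlice6Neg1 _ (by omega), h,
        show (op6 ++ mid ++ [')'] : List Char) = op6 ++ (mid ++ [')']) by simp, ← hlen6,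
        List.drop_left, List.dropLast_concat]
    simp
  have hsign : (if PySem.Str.pyGet? s 0 = some 'A' then (1:Int) else -1) = sign := by
    have h0 : PySem.Str.pyGet? s 0 = s.toList[0]? := by
      rw [PySem.Str.pyGet?_eq, PySem.Chars.pyGet?_eq_listPyGet?, PySem.List.pyGet?_zero]
    rcases hop with ⟨h1, h2⟩ | ⟨h1, h2⟩ <;> subst h1 <;> subst h2
    · rw [if_pos (by rw [h0, h]; rfl)]
    · rw [if_neg (by rw [h0, h]; simp)]
  rw [pvParseLoop, dif_pos hguard]
  dsimp only
  rw [hsign, hbody]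
  have hto : (String.ofList mid).toList = mid := by simp
  have hrf : PySem.Str.rfind (String.ofList mid) "," = PySem.Chars.rfind mid [','] := by
    rw [PySem.Str.rfind_eq, hto]; rfl
  rw [hrf]
  by_cases hj : (0:Int) ≤ PySem.Chars.rfind mid [',']
  · rw [if_pos hj]
    have hlhs : PySem.Str.slice (String.ofList mid) none (some (PySem.Chars.rfind mid [','])) =
        String.ofList (mid.take (PySem.Chars.rfind mid [',']).toNat) := by
      rw [← String.toList_inj, PySem.Str.toList_slice, hto, PySem.Chars.slice_eq_listSlice,
          PySem.List.slice_to _ hj]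
      simp
    have hrhs : PySem.Str.slice (String.ofList mid) (some (PySem.Chars.rfind mid [','] + 1)) none =
        String.ofList (mid.drop ((PySem.Chars.rfind mid [',']).toNat + 1)) := by
      rw [← String.toList_inj, PySem.Str.toList_slice, hto, PySem.Chars.slice_eq_listSlice,
          PySem.List.slice_from _ (by omega), show (PySem.Chars.rfind mid [','] + 1).toNat
            = (PySem.Chars.rfind mid [',']).toNat + 1 from by omega]
      simp
    rw [if_pos hj, if_pos hj, if_pos hj, hlhs, hrhs]
    have hcond : (String.ofList (mid.drop ((PySem.Chars.rfind mid [',']).toNat + 1)) = "i_fs") ↔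
        (mid.drop ((PySem.Chars.rfind mid [',']).toNat + 1) = "i_fs".toList) := by
      rw [← String.toList_inj]
      simp
    by_cases hfs : mid.drop ((PySem.Chars.rfind mid [',']).toNat + 1) = "i_fs".toList
    · rw [if_pos (hcond.mpr hfs), if_pos hfs, pvOfStrOfList]
    · rw [if_neg (fun hx => hfs (hcond.mp hx)), if_neg hfs, pvOfStrOfList]
  · rw [if_neg hj, if_neg hj, if_neg hj, if_neg hj]
    have hcond : ((String.ofList mid : String) = "i_fs") ↔ (mid = "i_fs".toList) := by
      rw [← String.toList_inj]
      simp
    by_cases hfs : mid = "i_fs".toList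
    · rw [if_pos (hcond.mpr hfs), if_pos hfs]
      rfl
    · rw [if_neg (fun hx => hfs (hcond.mp hx)), if_neg hfs, pvOfStrOfList]

-- Port A on a plain token (no operator prefix).
theorem pvPortABase (s : String) (hA : ¬ "Add64".toList <+: s.toList)
    (hS : ¬ "Sub64".toList <+: s.toList) :
    parse_reg_offset s =
      if "i_".toList <+: s.toList then (some (PySem.Str.replace s "i_" ""), 0)
      else (none, (PySem.Int.ofChars? s.toList).getD 0) := by
  have hguard : ¬ ((PySem.Str.startswith s "Add64" || PySem.Str.startswith s "Sub64") = true) := by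
    rw [Bool.or_eq_true_iff]
    rintro (hx | hx)
    · exact hA ((PySem.Chars.startswith_iff _ _).mp hx)
    · exact hS ((PySem.Chars.startswith_iff _ _).mp hx)
  rw [parse_reg_offset, dif_neg hguard]
  by_cases hi : "i_".toList <+: s.toList
  · have hsw : PySem.Str.startswith s "i_" = true := by
      rw [PySem.Str.startswith_eq]
      exact (PySem.Chars.startswith_iff _ _).mpr hi
    rw [if_pos hsw, if_pos hi]
  · have hsw : ¬ (PySem.Str.startswith s "i_" = true) := by
      rw [PySem.Str.startswith_eq]
      exact fun hx => hi ((PySem.Chars.startswith_iff _ _).mp hx)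
    rw [if_neg hsw, if_neg hi]
    rfl

-- Port B on a plain token (no operator prefix).
theorem pvPortBBase (s : String) (hA : ¬ "Add64".toList <+: s.toList)
    (hS : ¬ "Sub64".toList <+: s.toList) (acc : Int) :
    pvParseLoop s acc =
      if "i_".toList <+: s.toList then (some (PySem.Str.replace s "i_" ""), acc)
      else (none, acc + (PySem.Int.ofChars? s.toList).getD 0) := by
  have hguard : ¬ (PySem.Str.slice s none (some 6) = "Add64(" ∨ PySem.Str.slice s none (some 6) = "Sub64(") := by
    rintro (hx | hx)
    · apply hA
      have := congrArg String.toList hx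
      rw [PySem.Str.toList_slice, PySem.Chars.slice_eq_listSlice,
          PySem.List.slice_to _ (by omega : (0:Int) ≤ 6)] at this
      calc "Add64".toList <+: "Add64(".toList := ⟨['('], rfl⟩
        _ = s.toList.take ((6:Int).toNat) := this.symm
        _ <+: s.toList := List.take_prefix _ _
    · apply hS
      have := congrArg String.toList hx
      rw [PySem.Str.toList_slice, PySem.Chars.slice_eq_listSlice,
          PySem.List.slice_to _ (by omega : (0:Int) ≤ 6)] at this
      calc "Sub64".toList <+: "Sub64(".toList := ⟨['('], rfl⟩
        _ = s.toList.take ((6:Int).toNat) := this.symm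
        _ <+: s.toList := List.take_prefix _ _
  rw [pvParseLoop, dif_neg hguard]
  by_cases hi : "i_".toList <+: s.toList
  · have hsl2 : PySem.Str.slice s none (some 2) = "i_" := by
      rw [← String.toList_inj, PySem.Str.toList_slice, PySem.Chars.slice_eq_listSlice,
          PySem.List.slice_to _ (by omega : (0:Int) ≤ 2)]
      exact (List.prefix_iff_eq_take.mp hi).symm
    rw [if_pos hsl2, if_pos hi]
  · have hsl2 : ¬ (PySem.Str.slice s none (some 2) = "i_") := by
      intro hx
      apply hi
      have := congrArg String.toList hx
      rw [PySem.Str.toList_slice, PySem.Chars.slice_eq_listSlice,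
          PySem.List.slice_to _ (by omega : (0:Int) ≤ 2)] at this
      rw [← this]
      exact List.take_prefix _ _
    rw [if_neg hsl2, if_neg hi]
    rfl

theorem pvTokCase (s : String) (h : pvTok s.toList = true) (acc : Int) :
    pvParseLoop s acc = ((parse_reg_offset s).1, (parse_reg_offset s).2 + acc) := by
  rw [pvTok, decide_eq_true_eq] at h
  obtain ⟨⟨hna, hns⟩, hbase⟩ := h
  have hA : ¬ "Add64".toList <+: s.toList := fun hx => hna (List.isPrefixOf_iff_prefix.mpr hx)
  have hS : ¬ "Sub64".toList <+: s.toList := fun hx => hns (List.isPrefixOf_iff_prefix.mpr hx)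
  rw [pvPortABase s hA hS, pvPortBBase s hA hS acc]
  by_cases hi : "i_".toList <+: s.toList
  · simp only [if_pos hi]
    simp
  · simp only [if_neg hi]
    simp [Int.add_comm]

theorem pv_main : ∀ (d : Nat) (s : String), pvWfDepth d s.toList = true →
    ∀ acc : Int, pvParseLoop s acc = ((parse_reg_offset s).1, (parse_reg_offset s).2 + acc) := by
  intro d
  induction d with
  | zero =>
    intro s hwf acc
    exact pvTokCase s hwf acc
  | succ d ih =>
    intro s hwf acc
    simp only [pvWfDepth] at hwf
    split at hwf
    case _ hg =>
      rcases Bool.or_eq_true_iff.mp hg.1 with hpre | hpre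
      · obtain ⟨tail0, htail⟩ := List.isPrefixOf_iff_prefix.mp hpre
        have htne : tail0 ≠ [] := by
          intro h0
          rw [h0, List.append_nil] at htail
          have h2 := hg.2
          rw [← htail] at h2
          exact absurd h2 (by decide)
        have hlast : tail0.getLast htne = ')' := by
          have h2 := hg.2
          rw [← htail, List.getLast?_append_of_ne_nil _ htne, List.getLast?_eq_getLast_of_ne_nil htne] at h2
          injection h2
        have hcs : s.toList = "Add64(".toList ++ tail0.dropLast ++ [')'] := by
          rw [← htail, List.append_assoc]
          congr 1
          rw [← hlast, List.dropLast_append_getLast htne]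
        have hdrop : (List.drop 6 s.toList).dropLast = tail0.dropLast := by
          rw [← htail, show (6:Nat) = ("Add64(".toList).length from rfl, List.drop_left]
        rw [hdrop] at hwf
        split at hwf
        case _ hj =>
          rw [decide_eq_true_eq] at hwf
          rw [pvPortAStepAdd s tail0.dropLast hcs,
              pvPortBStep s "Add64(".toList 1 tail0.dropLast (Or.inl ⟨rfl, rfl⟩) hcs acc]
          simp only [if_pos hj]
          rcases hwf with ⟨hfs, hil⟩ | ⟨hir, hwl⟩
          · rw [if_pos hfs, if_pos hfs]
            simp [Int.add_comm]
          · have hfsne : ¬ (List.drop ((PySem.Chars.rfind tail0.dropLast [',']).toNat + 1) tail0.dropLast = "i_fs".toList) := by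
              intro hx
              rw [hx] at hir
              exact absurd hir (by decide)
            rw [if_neg hfsne, if_neg hfsne]
            rw [ih (String.ofList (List.take (PySem.Chars.rfind tail0.dropLast [',']).toNat tail0.dropLast))
                (by simpa using hwl)]
            simp
            ring
        case _ =>
          exact absurd hwf (by decide)
      · -- Sub64
        obtain ⟨tail0, htail⟩ := List.isPrefixOf_iff_prefix.mp hpre
        have htne : tail0 ≠ [] := by
          intro h0
          rw [h0, List.append_nil] at htail
          have h2 := hg.2
          rw [← htail] at h2
          exact absurd h2 (by decide)
        have hlast : tail0.getLast htne = ')' := by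
          have h2 := hg.2
          rw [← htail, List.getLast?_append_of_ne_nil _ htne, List.getLast?_eq_getLast_of_ne_nil htne] at h2
          injection h2
        have hcs : s.toList = "Sub64(".toList ++ tail0.dropLast ++ [')'] := by
          rw [← htail, List.append_assoc]
          congr 1
          rw [← hlast, List.dropLast_append_getLast htne]
        have hdrop : (List.drop 6 s.toList).dropLast = tail0.dropLast := by
          rw [← htail, show (6:Nat) = ("Sub64(".toList).length from rfl, List.drop_left]
        rw [hdrop] at hwf
        split at hwf
        case _ hj =>
          rw [decide_eq_true_eq] at hwf
          rw [pvPortAStepSub s tail0.dropLast hcs,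
              pvPortBStep s "Sub64(".toList (-1) tail0.dropLast (Or.inr ⟨rfl, rfl⟩) hcs acc]
          simp only [if_pos hj]
          rcases hwf with ⟨hfs, hil⟩ | ⟨hir, hwl⟩
          · rw [if_pos hfs, if_pos hfs]
            simp [Int.add_comm]
          · have hfsne : ¬ (List.drop ((PySem.Chars.rfind tail0.dropLast [',']).toNat + 1) tail0.dropLast = "i_fs".toList) := by
              intro hx
              rw [hx] at hir
              exact absurd hir (by decide)
            rw [if_neg hfsne, if_neg hfsne]
            rw [ih (String.ofList (List.take (PySem.Chars.rfind tail0.dropLast [',']).toNat tail0.dropLast))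
                (by simpa using hwl)]
            simp
            ring
        case _ =>
          exact absurd hwf (by decide)
    case _ hng =>
      exact pvTokCase s hwf acc

-- ===== VERDICT (by name: the statement is the Claim_ definition above) =====
theorem parse_reg_offset_spec : Claim_equal_parse_reg_offset := by
  intro location _ hpre
  unfold Spec_parse_reg_offset parse_reg_offset_alt
  rw [pv_main location.toList.length location hpre 0]
  simp
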